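-- pv_equiv track=rewrite | github.com/eenvil/Stage12_remote_run | stage2/main.py | find_envmap_data_key
-- ===== SOURCE A (Python) =====
-- def find_envmap_data_key(params) -> str | None:
--     for k in params.keys():
--         kl = k.lower()
--         if "env_light" in kl and kl.endswith(".data"):
--             return k
--     for k in params.keys():
--         kl = k.lower()
--         if "env_light" in kl and "data" in kl:
--             return k
--     return None
-- ===== SOURCE B (Python) =====
-- def find_envmap_data_key(params) -> str | None:
--     fallback = None
--     for k in params.keys():
--         kl = k.lower()
--         if "env_light" in kl:
--             if kl.endswith(".data"):
--                 return k
--             if "data" in kl and fallback is None: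
--                 fallback = k
--     return fallback
-- ===== Notes on version B (the rewrite author's own statement) =====
-- stated objective: simpler
-- what changed: Replaces A's two priority-ordered scans over the keys with a single pass that returns a strong match ('.data' suffix) immediately and remembers the first weak match ('data' substring) as a fallback returned after the loop.
import Mathlib
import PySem

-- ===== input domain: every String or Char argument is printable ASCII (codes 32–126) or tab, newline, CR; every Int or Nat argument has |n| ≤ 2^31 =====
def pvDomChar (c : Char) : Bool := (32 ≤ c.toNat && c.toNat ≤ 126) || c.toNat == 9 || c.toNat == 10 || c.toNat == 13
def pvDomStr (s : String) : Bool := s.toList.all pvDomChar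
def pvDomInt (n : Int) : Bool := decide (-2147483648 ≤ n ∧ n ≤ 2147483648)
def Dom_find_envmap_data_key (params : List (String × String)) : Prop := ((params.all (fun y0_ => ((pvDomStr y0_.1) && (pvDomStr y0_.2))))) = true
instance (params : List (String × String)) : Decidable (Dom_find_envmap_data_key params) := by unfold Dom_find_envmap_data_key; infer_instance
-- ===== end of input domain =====

-- B replaces A's two priority-ordered scans with a single pass keeping one fallback candidate (simpler).


-- ===== PORT A =====
-- first for-loop: return first key whose lowering contains "env_light" and ends with ".data";
-- second for-loop: otherwise first key whose lowering contains "env_light" and "data"; else None.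
def find_envmap_data_key (params : List (String × String)) : Option String :=
  match params.find? (fun p =>
      let kl := PySem.Str.lower p.1
      PySem.Str.isIn "env_light" kl && PySem.Str.endswith kl ".data") with
  | some p => some p.1
  | none =>
    match params.find? (fun p =>
        let kl := PySem.Str.lower p.1
        PySem.Str.isIn "env_light" kl && PySem.Str.isIn "data" kl) with
    | some p => some p.1
    | none => none

-- ===== PORT B =====
-- single pass: return a strong match at once, remember the first weak-only match as fallback.
def find_envmap_data_key_alt_loop : List (String × String) → Option String → Option String
  | [], fallback => fallback
  | p :: rest, fallback =>
    let kl := PySem.Str.lower p.1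
    if PySem.Str.isIn "env_light" kl then
      if PySem.Str.endswith kl ".data" then some p.1
      else if PySem.Str.isIn "data" kl && fallback.isNone then
        find_envmap_data_key_alt_loop rest (some p.1)
      else find_envmap_data_key_alt_loop rest fallback
    else find_envmap_data_key_alt_loop rest fallback

def find_envmap_data_key_alt (params : List (String × String)) : Option String :=
  find_envmap_data_key_alt_loop params none

-- ===== PRECONDITION & SPEC =====
def Spec_find_envmap_data_key (params : List (String × String)) (out : Option String) : Prop := out = find_envmap_data_key_alt params
instance (params : List (String × String)) (out : Option String) : Decidable (Spec_find_envmap_data_key params out) := by unfold Spec_find_envmap_data_key; infer_instance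

-- ===== CLAIM (what is proved, stated in full; the proofs are below) =====
def Claim_equal_find_envmap_data_key : Prop := ∀ (params : List (String × String)), Dom_find_envmap_data_key params → Spec_find_envmap_data_key params (find_envmap_data_key params)

-- ===== LEMMAS AND PROOFS =====
def pvStrong (k : String) : Bool :=
  PySem.Str.isIn "env_light" (PySem.Str.lower k) && PySem.Str.endswith (PySem.Str.lower k) ".data"

def pvWeak (k : String) : Bool :=
  PySem.Str.isIn "env_light" (PySem.Str.lower k) && PySem.Str.isIn "data" (PySem.Str.lower k)

theorem pvLoop_char (xs : List (String × String)) (fb : Option String) :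
    find_envmap_data_key_alt_loop xs fb =
      match xs.find? (fun p => pvStrong p.1) with
      | some p => some p.1
      | none =>
        match fb with
        | some v => some v
        | none => (xs.find? (fun p => pvWeak p.1)).map Prod.fst := by
  induction xs generalizing fb with
  | nil => cases fb <;> simp [find_envmap_data_key_alt_loop]
  | cons p rest ih =>
    by_cases hE : PySem.Chars.isIn ['e','n','v','_','l','i','g','h','t'] (PySem.Chars.lower p.1.toList) = true
    · by_cases hS : PySem.Chars.endswith (PySem.Chars.lower p.1.toList) ['.','d','a','t','a'] = true
      · simp [find_envmap_data_key_alt_loop, pvStrong, hE, hS]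
      · rw [Bool.not_eq_true] at hS
        by_cases hW : PySem.Chars.isIn ['d','a','t','a'] (PySem.Chars.lower p.1.toList) = true
        · cases fb with
          | none =>
            simp [find_envmap_data_key_alt_loop, pvStrong, pvWeak, hE, hS, hW, ih]
          | some v =>
            simp [find_envmap_data_key_alt_loop, pvStrong, hE, hS, hW, ih]
        · rw [Bool.not_eq_true] at hW
          simp [find_envmap_data_key_alt_loop, pvStrong, pvWeak, hE, hS, hW, ih]
    · rw [Bool.not_eq_true] at hE
      simp [find_envmap_data_key_alt_loop, pvStrong, pvWeak, hE, ih]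

-- ===== VERDICT (by name: the statement is the Claim_ definition above) =====
theorem find_envmap_data_key_spec : Claim_equal_find_envmap_data_key := by
  intro params _
  unfold Spec_find_envmap_data_key find_envmap_data_key_alt find_envmap_data_key
  rw [pvLoop_char]
  simp only [pvStrong, pvWeak]
  cases params.find? (fun p =>
      PySem.Str.isIn "env_light" (PySem.Str.lower p.1) &&
        PySem.Str.endswith (PySem.Str.lower p.1) ".data") with
  | some p => rfl
  | none =>
    cases params.find? (fun p =>
        PySem.Str.isIn "env_light" (PySem.Str.lower p.1) &&
          PySem.Str.isIn "data" (PySem.Str.lower p.1)) <;> rfl
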